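-- pv_equiv track=rewrite | github.com/Doctor3131/PraktikumASA | Pertemuan4/PersiapanSungJinWo/persiapanSungJinWo.py | cekNaik
-- ===== SOURCE A (Python) =====
-- def cekNaik(data1,data2):
--     n = len(data1)
--
--     indexData2 = {}
--     for i in range(n):
--         indexData2[data2[i]] = i
--
--     indexData1diData2 = [indexData2[angka] for angka in data1]
--
--     temp = 0
--     for i in range(n):
--         for j in range(i+1, n):
--             for k in range(j+1, n):
--                 if indexData1diData2[i] < indexData1diData2[j] < indexData1diData2[k]:
--                     temp += 1
--
--     return temp
-- ===== SOURCE B (Python) =====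
-- def cekNaik(data1, data2):
--     # Single forward-pass DP over length-3 increasing subsequences of the
--     # mapped sequence: each new element adds the number of increasing pairs
--     # it extends, and records how many pairs end at it.
--     n = len(data1)
--     pos = {}
--     for i in range(n):
--         pos[data2[i]] = i
--     total = 0
--     seen = []  # (mapped value, number of increasing pairs ending at it)
--     for x in data1:
--         mx = pos[x]
--         pairs = 0
--         gain = 0
--         for v, p in seen:
--             if v < mx:
--                 pairs += 1
--                 gain += p
--         total += gain
--         seen.append((mx, pairs))
--     return total
-- ===== Notes on version B (the rewrite author's own statement) =====
-- stated objective: faster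
-- what changed: Replaces A's cubic scan over all index triples by a single forward dynamic-programming pass that records, for each element, the number of increasing pairs ending at it and accumulates the triples each new element completes.
import Mathlib
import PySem

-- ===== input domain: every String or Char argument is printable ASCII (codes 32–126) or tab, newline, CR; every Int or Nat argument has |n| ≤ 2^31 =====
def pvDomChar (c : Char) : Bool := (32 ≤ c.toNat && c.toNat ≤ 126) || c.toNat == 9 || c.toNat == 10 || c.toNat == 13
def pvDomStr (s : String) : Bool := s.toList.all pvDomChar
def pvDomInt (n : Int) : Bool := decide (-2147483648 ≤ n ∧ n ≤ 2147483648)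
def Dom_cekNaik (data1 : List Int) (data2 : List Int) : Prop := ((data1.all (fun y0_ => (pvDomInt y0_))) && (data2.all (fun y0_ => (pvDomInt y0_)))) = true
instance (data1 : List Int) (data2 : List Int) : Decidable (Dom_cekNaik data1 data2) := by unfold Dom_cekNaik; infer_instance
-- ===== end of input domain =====

-- B replaces A's cubic scan of all index triples by a single forward DP pass
-- (pairs ending at each element); equal return values proved wherever A returns.

-- ===== PORT A =====
-- literal transliteration of A; the getD defaults 0 are unreachable under
-- Pre_cekNaik (out-of-range data2[i] / missing dict key are exactly what Pre_ excludes)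
def cekNaik (data1 : List Int) (data2 : List Int) : Int :=
  let n : Int := (data1.length : Int)
  let indexData2 : PySem.Dict Int Int :=
    (PySem.List.pyRange 0 n 1).foldl
      (fun d i => d.insert (PySem.List.pyGetD data2 i 0) i) PySem.Dict.empty
  let idx : List Int := data1.map (fun angka => indexData2.getD angka 0)
  (PySem.List.pyRange 0 n 1).foldl (fun temp i =>
    (PySem.List.pyRange (i + 1) n 1).foldl (fun temp j =>
      (PySem.List.pyRange (j + 1) n 1).foldl (fun temp k =>
        if PySem.List.pyGetD idx i 0 < PySem.List.pyGetD idx j 0 ∧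
           PySem.List.pyGetD idx j 0 < PySem.List.pyGetD idx k 0 then temp + 1 else temp)
        temp) temp) 0

-- ===== PORT B =====
-- literal transliteration of Source B: one forward pass; the state is
-- (seen = list of (mapped value, #increasing pairs ending at it), running total)
def cekNaik_alt (data1 : List Int) (data2 : List Int) : Int :=
  let n : Int := (data1.length : Int)
  let pos : PySem.Dict Int Int :=
    (PySem.List.pyRange 0 n 1).foldl
      (fun d i => d.insert (PySem.List.pyGetD data2 i 0) i) PySem.Dict.empty
  let st :=
    data1.foldl (fun (st : List (Int × Int) × Int) x =>
      let mx := pos.getD x 0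
      let pg := st.1.foldl
        (fun (pg : Int × Int) vp =>
          if vp.1 < mx then (pg.1 + 1, pg.2 + vp.2) else pg) (0, 0)
      (st.1 ++ [(mx, pg.1)], st.2 + pg.2)) ([], 0)
  st.2

-- ===== PRECONDITION & SPEC =====
-- Pre_ excludes exactly the inputs where Python A raises: an IndexError when
-- data2 is shorter than data1, and a KeyError when some element of data1 is not
-- among the first len(data1) elements of data2.
def Pre_cekNaik (data1 : List Int) (data2 : List Int) : Prop :=
  data1.length ≤ data2.length ∧ ∀ x ∈ data1, x ∈ data2.take data1.length
instance (data1 : List Int) (data2 : List Int) : Decidable (Pre_cekNaik data1 data2) := by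
  unfold Pre_cekNaik; infer_instance
def pvWitness_cekNaik : List Int × List Int := ([1, 3, 2], [3, 2, 1])

def Spec_cekNaik (data1 : List Int) (data2 : List Int) (out : Int) : Prop := out = cekNaik_alt data1 data2
instance (data1 : List Int) (data2 : List Int) (out : Int) : Decidable (Spec_cekNaik data1 data2 out) := by unfold Spec_cekNaik; infer_instance

-- ===== CLAIM (what is proved, stated in full; the proofs are below) =====
def Claim_equal_cekNaik : Prop := ∀ (data1 : List Int) (data2 : List Int), Dom_cekNaik data1 data2 → Pre_cekNaik data1 data2 → Spec_cekNaik data1 data2 (cekNaik data1 data2)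

-- ===== LEMMAS AND PROOFS =====

-- number of increasing pairs of the mapped sequence m ending at position j
def pcnt (m : List Int) (j : Nat) : Int :=
  ∑ i ∈ Finset.range j, if m.getD i 0 < m.getD j 0 then (1 : Int) else 0

-- number of increasing triples of m, middle/last-index-outer form
def cnt3 (m : List Int) : Int :=
  ∑ k ∈ Finset.range m.length, ∑ j ∈ Finset.range k,
    if m.getD j 0 < m.getD k 0 then pcnt m j else 0

-- the 'seen' list B maintains: (value, #pairs ending at it) for each position
def enrich (m : List Int) : List (Int × Int) :=
  (List.range m.length).map (fun j => (m.getD j 0, pcnt m j))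

lemma list_sum_range (N : Nat) (f : Nat → Int) :
    ((List.range N).map f).sum = ∑ i ∈ Finset.range N, f i := by
  induction N with
  | zero => simp
  | succ n ih => simp [List.range_succ, Finset.sum_range_succ, ih]

lemma sum_pyRange (a b : Int) (ha : 0 ≤ a) (h : Int → Int) :
    ((PySem.List.pyRange a b 1).map h).sum = ∑ j ∈ Finset.Ico a.toNat b.toNat, h ↑j := by
  rw [PySem.List.pyRange_one, List.map_map, list_sum_range, Finset.sum_Ico_eq_sum_range]
  have hb : (b - a).toNat = b.toNat - a.toNat := by omega
  rw [hb]
  refine Finset.sum_congr rfl fun k _ => ?_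
  simp only [Function.comp]
  congr 1
  push_cast
  omega

lemma countP_pyRange_int (a b : Int) (ha : 0 ≤ a) (p : Int → Bool) :
    (((PySem.List.pyRange a b 1).countP p : Nat) : Int) =
      ∑ j ∈ Finset.Ico a.toNat b.toNat, (if p ↑j then (1 : Int) else 0) := by
  rw [← sum_pyRange a b ha (fun j => if p j then (1 : Int) else 0)]
  induction (PySem.List.pyRange a b 1) with
  | nil => simp
  | cons x xs ih =>
      by_cases hx : p x <;> simp [hx, ih, add_comm]

-- A's nested loops as a triple Finset sum, then reordered to last-index-outer
lemma A_loops (m : List Int) :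
    (PySem.List.pyRange 0 (m.length : Int) 1).foldl (fun temp i =>
      (PySem.List.pyRange (i + 1) (m.length : Int) 1).foldl (fun temp j =>
        (PySem.List.pyRange (j + 1) (m.length : Int) 1).foldl (fun temp k =>
          if PySem.List.pyGetD m i 0 < PySem.List.pyGetD m j 0 ∧
             PySem.List.pyGetD m j 0 < PySem.List.pyGetD m k 0 then temp + 1 else temp)
          temp) temp) 0 = cnt3 m := by
  simp only [PySem.List.foldl_ite_add_one, PySem.List.foldl_add, zero_add]
  rw [sum_pyRange 0 (m.length : Int) le_rfl]
  simp only [Int.toNat_zero, Int.toNat_natCast]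
  have step1 : ∀ i : Nat,
      ((PySem.List.pyRange ((i : Int) + 1) (m.length : Int) 1).map (fun j =>
        (↑(List.countP (fun k => decide (PySem.List.pyGetD m ↑i 0 < PySem.List.pyGetD m j 0 ∧
            PySem.List.pyGetD m j 0 < PySem.List.pyGetD m k 0))
            (PySem.List.pyRange (j + 1) (m.length : Int) 1)) : Int))).sum
      = ∑ j ∈ Finset.Ico (i + 1) m.length, ∑ k ∈ Finset.Ico (j + 1) m.length,
          (if m.getD i 0 < m.getD j 0 ∧ m.getD j 0 < m.getD k 0 then (1 : Int) else 0) := by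
    intro i
    rw [sum_pyRange _ _ (by positivity)]
    have hi : ((i : Int) + 1).toNat = i + 1 := by omega
    rw [hi, Int.toNat_natCast]
    refine Finset.sum_congr rfl fun j _ => ?_
    rw [countP_pyRange_int _ _ (by positivity)]
    have hj : ((j : Int) + 1).toNat = j + 1 := by omega
    rw [hj, Int.toNat_natCast]
    refine Finset.sum_congr rfl fun k _ => ?_
    simp
  rw [Finset.sum_congr rfl fun i _ => step1 i]
  rw [Finset.sum_congr rfl
      (fun i _ => Finset.sum_Ico_Ico_comm' (i + 1) m.length
        (fun j k => if m.getD i 0 < m.getD j 0 ∧ m.getD j 0 < m.getD k 0 then (1 : Int) else 0))]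
  rw [Finset.sum_Ico_Ico_comm' 0 m.length
      (fun i k => ∑ j ∈ Finset.Ico (i + 1) k,
        if m.getD i 0 < m.getD j 0 ∧ m.getD j 0 < m.getD k 0 then (1 : Int) else 0)]
  rw [Finset.sum_congr rfl (fun k _ => Finset.sum_Ico_Ico_comm' 0 k
      (fun i j => if m.getD i 0 < m.getD j 0 ∧ m.getD j 0 < m.getD k 0 then (1 : Int) else 0))]
  simp only [← Finset.range_eq_Ico]
  unfold cnt3 pcnt
  refine Finset.sum_congr rfl fun k _ => Finset.sum_congr rfl fun j _ => ?_
  by_cases hq : m.getD j 0 < m.getD k 0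
  · rw [if_pos hq]
    exact Finset.sum_congr rfl fun i _ => if_congr (and_iff_left hq) rfl rfl
  · rw [if_neg hq]
    exact Finset.sum_eq_zero fun i _ => if_neg (by tauto)

-- B's inner loop over any seen list, as two map-sums
lemma fold_pairs (l : List (Int × Int)) (x a b : Int) :
    l.foldl (fun (pg : Int × Int) vp =>
        if vp.1 < x then (pg.1 + 1, pg.2 + vp.2) else pg) (a, b)
    = (a + (l.map (fun vp => if vp.1 < x then (1 : Int) else 0)).sum,
       b + (l.map (fun vp => if vp.1 < x then vp.2 else 0)).sum) := by
  induction l generalizing a b with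
  | nil => simp
  | cons v l ih =>
      by_cases hv : v.1 < x <;> simp [hv, ih, add_assoc]

lemma getD_append_lt (m : List Int) (x : Int) (i : Nat) (h : i < m.length) :
    (m ++ [x]).getD i 0 = m.getD i 0 := by
  simp [List.getD, List.getElem?_append_left h]

lemma getD_append_self (m : List Int) (x : Int) :
    (m ++ [x]).getD m.length 0 = x := by
  simp [List.getD]

lemma pcnt_append (m : List Int) (x : Int) (j : Nat) (hj : j < m.length) :
    pcnt (m ++ [x]) j = pcnt m j := by
  unfold pcnt
  refine Finset.sum_congr rfl fun i hi => ?_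
  rw [getD_append_lt m x i (by simp at hi; omega), getD_append_lt m x j hj]

lemma pcnt_append_self (m : List Int) (x : Int) :
    pcnt (m ++ [x]) m.length =
      ∑ i ∈ Finset.range m.length, if m.getD i 0 < x then (1 : Int) else 0 := by
  unfold pcnt
  rw [getD_append_self]
  refine Finset.sum_congr rfl fun i hi => ?_
  rw [getD_append_lt m x i (by simpa using hi)]

lemma enrich_append (m : List Int) (x : Int) :
    enrich (m ++ [x]) = enrich m ++
      [(x, ∑ i ∈ Finset.range m.length, if m.getD i 0 < x then (1 : Int) else 0)] := by
  unfold enrich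
  rw [List.length_append, List.length_singleton, List.range_succ, List.map_append]
  congr 1
  · refine List.map_congr_left fun j hj => ?_
    have hj' : j < m.length := by simpa using hj
    rw [getD_append_lt m x j hj', pcnt_append m x j hj']
  · simp [pcnt_append_self]

lemma cnt3_append (m : List Int) (x : Int) :
    cnt3 (m ++ [x]) = cnt3 m +
      ∑ j ∈ Finset.range m.length, if m.getD j 0 < x then pcnt m j else 0 := by
  unfold cnt3
  rw [List.length_append, List.length_singleton, Finset.sum_range_succ]
  congr 1
  · refine Finset.sum_congr rfl fun k hk => ?_
    have hk' : k < m.length := by simpa using hk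
    refine Finset.sum_congr rfl fun j hj => ?_
    have hj' : j < m.length := by simp at hj; omega
    rw [getD_append_lt m x j hj', getD_append_lt m x k hk', pcnt_append m x j hj']
  · refine Finset.sum_congr rfl fun j hj => ?_
    have hj' : j < m.length := by simpa using hj
    rw [getD_append_lt m x j hj', getD_append_self, pcnt_append m x j hj']

-- main invariant of B's forward pass
lemma B_loop (g : Int → Int) (xs : List Int) (m : List Int) (T : Int) :
    xs.foldl (fun (st : List (Int × Int) × Int) x =>
        let mx := g x
        let pg := st.1.foldl
          (fun (pg : Int × Int) vp =>
            if vp.1 < mx then (pg.1 + 1, pg.2 + vp.2) else pg) (0, 0)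
        (st.1 ++ [(mx, pg.1)], st.2 + pg.2)) (enrich m, T)
    = (enrich (m ++ xs.map g), T + cnt3 (m ++ xs.map g) - cnt3 m) := by
  induction xs generalizing m T with
  | nil => simp
  | cons x xs ih =>
      have hmap1 : ((enrich m).map (fun vp => if vp.1 < g x then (1 : Int) else 0)).sum
          = ∑ i ∈ Finset.range m.length, if m.getD i 0 < g x then (1 : Int) else 0 := by
        unfold enrich
        rw [List.map_map, list_sum_range]
        exact Finset.sum_congr rfl fun i _ => rfl
      have hmap2 : ((enrich m).map (fun vp => if vp.1 < g x then vp.2 else 0)).sum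
          = ∑ j ∈ Finset.range m.length, if m.getD j 0 < g x then pcnt m j else 0 := by
        unfold enrich
        rw [List.map_map, list_sum_range]
        exact Finset.sum_congr rfl fun j _ => rfl
      have hstep : (let mx := g x
            let pg := (enrich m, T).1.foldl
              (fun (pg : Int × Int) vp =>
                if vp.1 < mx then (pg.1 + 1, pg.2 + vp.2) else pg) (0, 0)
            ((enrich m, T).1 ++ [(mx, pg.1)], (enrich m, T).2 + pg.2))
          = (enrich (m ++ [g x]),
             T + ∑ j ∈ Finset.range m.length, if m.getD j 0 < g x then pcnt m j else 0) := by
        dsimp only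
        rw [fold_pairs, hmap1, hmap2, zero_add, zero_add, ← enrich_append]
      rw [List.foldl_cons, hstep, ih (m ++ [g x]) _]
      have htel := cnt3_append m (g x)
      have hassoc : (m ++ [g x]) ++ xs.map g = m ++ (x :: xs).map g := by
        rw [List.append_assoc]; rfl
      rw [hassoc]
      refine Prod.ext rfl ?_
      dsimp only
      omega
  
-- both ports, with the (identical) position dictionary abstracted out
lemma main_eq (pos : PySem.Dict Int Int) (data1 : List Int) :
    (PySem.List.pyRange 0 (data1.length : Int) 1).foldl (fun temp i =>
      (PySem.List.pyRange (i + 1) (data1.length : Int) 1).foldl (fun temp j =>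
        (PySem.List.pyRange (j + 1) (data1.length : Int) 1).foldl (fun temp k =>
          if PySem.List.pyGetD (data1.map (fun angka => pos.getD angka 0)) i 0 <
               PySem.List.pyGetD (data1.map (fun angka => pos.getD angka 0)) j 0 ∧
             PySem.List.pyGetD (data1.map (fun angka => pos.getD angka 0)) j 0 <
               PySem.List.pyGetD (data1.map (fun angka => pos.getD angka 0)) k 0
          then temp + 1 else temp) temp) temp) 0
    = (data1.foldl (fun (st : List (Int × Int) × Int) x =>
        (st.1 ++ [(pos.getD x 0,
            (st.1.foldl (fun (pg : Int × Int) vp =>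
              if vp.1 < pos.getD x 0 then (pg.1 + 1, pg.2 + vp.2) else pg) (0, 0)).1)],
         st.2 + (st.1.foldl (fun (pg : Int × Int) vp =>
              if vp.1 < pos.getD x 0 then (pg.1 + 1, pg.2 + vp.2) else pg) (0, 0)).2))
        ([], 0)).2 := by
  have hlen : (data1.length : Int)
      = ((data1.map (fun angka => pos.getD angka 0)).length : Int) := by simp
  rw [hlen, A_loops]
  have hB := B_loop (fun a => pos.getD a 0) data1 [] 0
  dsimp only at hB
  rw [show (enrich [] : List (Int × Int)) = [] from rfl] at hB
  rw [hB]
  have h0 : cnt3 [] = 0 := by simp [cnt3]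
  simp only [List.nil_append, h0]
  omega

-- ===== VERDICT (by name: the statement is the Claim_ definition above) =====
theorem cekNaik_spec : Claim_equal_cekNaik := by
  intro data1 data2 _ _
  unfold Spec_cekNaik cekNaik cekNaik_alt
  exact main_eq ((PySem.List.pyRange 0 (data1.length : Int) 1).foldl
      (fun d i => d.insert (PySem.List.pyGetD data2 i 0) i) PySem.Dict.empty) data1
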